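-- pv_equiv track=rewrite | github.com/eliasbrange/aoc2021 | src/day10.py | completion_score
-- ===== SOURCE A (Python) =====
-- def completion_score(string: str) -> int:
--     CHAR_SCORE = {
--         "(": 1,
--         "[": 2,
--         "{": 3,
--         "<": 4,
--     }
--
--     score = 0
--     for char in string:
--         score *= 5
--         score += CHAR_SCORE[char]
--
--     return score
-- ===== SOURCE B (Python) =====
-- def completion_score(string: str) -> int:
--     TRANS = {
--         "(": "1",
--         "[": "2",
--         "{": "3",
--         "<": "4",
--     }
--     digits = "".join(TRANS[c] for c in string)
--     return int(digits, 5) if digits else 0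
-- ===== Notes on version B (the rewrite author's own statement) =====
-- stated objective: idiomatic
-- what changed: Replaces the hand-rolled Horner accumulation with a representation-then-parse strategy: translate each bracket to its base-5 digit character, join them into a digit string, and let int(s, 5) do the numeric conversion (0 for the empty string).
import Mathlib
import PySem

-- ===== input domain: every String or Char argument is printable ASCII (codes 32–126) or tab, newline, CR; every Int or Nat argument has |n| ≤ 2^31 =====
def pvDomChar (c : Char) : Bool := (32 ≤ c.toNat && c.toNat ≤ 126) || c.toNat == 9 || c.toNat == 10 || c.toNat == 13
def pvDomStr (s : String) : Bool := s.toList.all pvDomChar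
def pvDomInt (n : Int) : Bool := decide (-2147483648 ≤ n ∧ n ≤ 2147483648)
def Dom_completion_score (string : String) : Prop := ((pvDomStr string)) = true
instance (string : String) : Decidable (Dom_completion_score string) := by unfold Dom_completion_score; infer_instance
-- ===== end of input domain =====

-- B replaces A's Horner accumulation loop with a representation-then-parse strategy:
-- translate brackets to base-5 digit characters, then parse the digit string (idiomatic; same cost).

-- ===== PORT A =====
-- A's dict literal CHAR_SCORE
def pvCharScoreA : PySem.Dict Char Int :=
  PySem.Dict.ofList [('(', 1), ('[', 2), ('{', 3), ('<', 4)]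

-- A's loop: score = score*5 + CHAR_SCORE[char].  The KeyError case (char not a key)
-- is excluded by Pre_completion_score; the default 0 is never reached inside Pre_.
def completion_score (string : String) : Int :=
  string.toList.foldl (fun score c => score * 5 + PySem.Dict.getD pvCharScoreA c 0) 0

-- ===== PORT B =====
-- B's dict literal TRANS (bracket → base-5 digit character)
def pvTrans : PySem.Dict Char Char :=
  PySem.Dict.ofList [('(', '1'), ('[', '2'), ('{', '3'), ('<', '4')]

-- hand port of int(digits, 5): exact for nonempty strings of digit chars '0'..'4',
-- which is the only shape B ever passes it (TRANS values; KeyError excluded by Pre_).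
def pvParse5 : List Char → Int → Int
  | [], acc => acc
  | c :: t, acc => pvParse5 t (acc * 5 + ((c.toNat : Int) - 48))

-- digits = "".join(TRANS[c] for c in string); int(digits, 5) if digits else 0
def completion_score_alt (string : String) : Int :=
  let digits := string.toList.map (fun c => PySem.Dict.getD pvTrans c '0')
  if digits.isEmpty then 0 else pvParse5 digits 0

-- ===== PRECONDITION & SPEC =====
-- Pre_ excludes strings containing a character outside "([{<": there both Pythons raise KeyError.
def Pre_completion_score (string : String) : Prop :=
  string.toList.all (fun c => c == '(' || c == '[' || c == '{' || c == '<') = true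
instance (string : String) : Decidable (Pre_completion_score string) := by
  unfold Pre_completion_score; infer_instance

def pvWitness_completion_score : String := "([{<"

def Spec_completion_score (string : String) (out : Int) : Prop := out = completion_score_alt string
instance (string : String) (out : Int) : Decidable (Spec_completion_score string out) := by unfold Spec_completion_score; infer_instance

-- ===== CLAIM (what is proved, stated in full; the proofs are below) =====
def Claim_equal_completion_score : Prop := ∀ (string : String), Dom_completion_score string → Pre_completion_score string → Spec_completion_score string (completion_score string)

-- ===== LEMMAS AND PROOFS =====

-- the bracket characters admitted by Pre_
def pvOk (c : Char) : Prop := c = '(' ∨ c = '[' ∨ c = '{' ∨ c = '<'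

-- on admitted characters, A's score dict and B's digit dict agree in value
theorem pvStep_eq {c : Char} (h : pvOk c) :
    ((PySem.Dict.getD pvTrans c '0').toNat : Int) - 48 = PySem.Dict.getD pvCharScoreA c 0 := by
  rcases h with h | h | h | h <;> subst h <;> decide

-- A's Horner fold over admitted characters equals B's parse of the translated digits
theorem fold_eq_parse (l : List Char) (hl : ∀ c ∈ l, pvOk c) (acc : Int) :
    l.foldl (fun score c => score * 5 + PySem.Dict.getD pvCharScoreA c 0) acc
      = pvParse5 (l.map (fun c => PySem.Dict.getD pvTrans c '0')) acc := by
  induction l generalizing acc with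
  | nil => rfl
  | cons c t ih =>
      simp only [List.foldl_cons, List.map_cons, pvParse5]
      rw [pvStep_eq (hl c (List.mem_cons_self)), ih (fun x hx => hl x (List.mem_cons_of_mem _ hx))]

-- ===== VERDICT (by name: the statement is the Claim_ definition above) =====
theorem completion_score_spec : Claim_equal_completion_score := by
  intro s _ hpre
  show completion_score s = completion_score_alt s
  have hok : ∀ c ∈ s.toList, pvOk c := by
    intro c hc
    have := (List.all_eq_true.mp hpre) c hc
    simp only [Bool.or_eq_true, beq_iff_eq] at this
    unfold pvOk; tauto
  unfold completion_score completion_score_alt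
  rw [fold_eq_parse s.toList hok 0]
  cases h : s.toList with
  | nil => simp [pvParse5]
  | cons c t => simp [List.isEmpty]
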